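-- pv_equiv track=rewrite | github.com/rumey/gokart | gokart/geometry_tools.py | first_selfintersect_point
-- ===== SOURCE A (Python) =====
-- def first_selfintersect_point(ring_coords):
--     """
--     return the first selfintersect point
--     """
--     index = 0
--     coord_map = {}
--     for coord in ring_coords:
--         if coord in coord_map:
--             if index not in [0,len(ring_coords) - 1]:
--                 return (coord,coord_map[coord],index)
--         else:
--             coord_map[coord] = index
--         index += 1
--
--     return None
-- ===== SOURCE B (Python) =====
-- def first_selfintersect_point(ring_coords):
--     """
--     return the first selfintersect point
--     """
--     n = len(ring_coords)
--     first = {}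
--     for i, c in enumerate(ring_coords):
--         if c not in first:
--             first[c] = i
--     for j, c in enumerate(ring_coords):
--         if 0 < j < n - 1 and first[c] < j:
--             return (c, first[c], j)
--     return None
-- ===== Notes on version B (the rewrite author's own statement) =====
-- stated objective: alternative
-- what changed: B replaces A's single interleaved loop (membership test + conditional insertion + early return) by two independent passes: pass 1 builds the complete first-occurrence index table, pass 2 scans indices 1..n-2 and returns the first position whose coordinate's first occurrence is strictly earlier.
import Mathlib
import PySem

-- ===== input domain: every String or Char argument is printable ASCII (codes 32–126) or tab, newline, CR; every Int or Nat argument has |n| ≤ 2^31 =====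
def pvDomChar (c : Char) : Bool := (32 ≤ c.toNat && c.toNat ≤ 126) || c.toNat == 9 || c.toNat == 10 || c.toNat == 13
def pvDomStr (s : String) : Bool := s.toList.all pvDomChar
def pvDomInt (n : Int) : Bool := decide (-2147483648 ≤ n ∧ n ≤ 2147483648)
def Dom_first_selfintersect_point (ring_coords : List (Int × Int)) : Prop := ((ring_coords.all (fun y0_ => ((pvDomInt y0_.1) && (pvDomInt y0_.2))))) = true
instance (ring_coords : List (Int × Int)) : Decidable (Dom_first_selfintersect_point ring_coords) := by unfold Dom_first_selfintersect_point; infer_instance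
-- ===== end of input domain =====

-- B replaces A's single interleaved loop (membership + insertion + early return) by two passes:
-- build the full first-occurrence index table, then scan for the first inner index whose
-- coordinate occurred strictly earlier; same values everywhere (objective: alternative).

-- ===== PORT A =====
-- A's loop: index, coord_map threaded through; `coord in coord_map` / `coord_map[coord] = index`
def fspAloop (n : Int) : List (Int × Int) → Int → PySem.Dict (Int × Int) Int → Option ((Int × Int) × Int × Int)
  | [], _, _ => none
  | c :: rest, index, m =>
    match m.get? c with
    | some v =>
      if index ≠ 0 ∧ index ≠ n - 1 then some (c, v, index)
      else fspAloop n rest (index + 1) m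
    | none => fspAloop n rest (index + 1) (m.insert c index)

def first_selfintersect_point (ring_coords : List (Int × Int)) : Option ((Int × Int) × Int × Int) :=
  fspAloop (ring_coords.length : Int) ring_coords 0 PySem.Dict.empty

-- ===== PORT B =====
-- pass 1: `for i, c in enumerate(ring_coords): if c not in first: first[c] = i`
def fspBuild : List (Int × Int) → Int → PySem.Dict (Int × Int) Int → PySem.Dict (Int × Int) Int
  | [], _, m => m
  | c :: rest, i, m => fspBuild rest (i + 1) (if m.contains c then m else m.insert c i)

-- pass 2: `for j, c in enumerate(...): if 0 < j < n - 1 and first[c] < j: return (c, first[c], j)`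
-- (`first[c]` ported as getD _ 0: every coordinate of the list is a key of `first`, so it never raises)
def fspScan (n : Int) (first : PySem.Dict (Int × Int) Int) :
    List (Int × Int) → Int → Option ((Int × Int) × Int × Int)
  | [], _ => none
  | c :: rest, j =>
    if 0 < j ∧ j < n - 1 ∧ first.getD c 0 < j then some (c, first.getD c 0, j)
    else fspScan n first rest (j + 1)

def first_selfintersect_point_alt (ring_coords : List (Int × Int)) : Option ((Int × Int) × Int × Int) :=
  fspScan (ring_coords.length : Int) (fspBuild ring_coords 0 PySem.Dict.empty) ring_coords 0

-- ===== PRECONDITION & SPEC =====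
def Spec_first_selfintersect_point (ring_coords : List (Int × Int)) (out : Option ((Int × Int) × Int × Int)) : Prop := out = first_selfintersect_point_alt ring_coords
instance (ring_coords : List (Int × Int)) (out : Option ((Int × Int) × Int × Int)) : Decidable (Spec_first_selfintersect_point ring_coords out) := by unfold Spec_first_selfintersect_point; infer_instance

-- ===== CLAIM (what is proved, stated in full; the proofs are below) =====
def Claim_equal_first_selfintersect_point : Prop := ∀ (ring_coords : List (Int × Int)), Dom_first_selfintersect_point ring_coords → Spec_first_selfintersect_point ring_coords (first_selfintersect_point ring_coords)

-- ===== LEMMAS AND PROOFS =====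

-- pass 1 splits over an append
lemma fspBuild_append (xs ys : List (Int × Int)) :
    ∀ (i : Int) (m : PySem.Dict (Int × Int) Int),
      fspBuild (xs ++ ys) i m = fspBuild ys (i + xs.length) (fspBuild xs i m) := by
  induction xs with
  | nil => intro i m; simp [fspBuild]
  | cons x xs ih =>
    intro i m
    have harith : i + 1 + (xs.length : Int) = i + ((x :: xs).length : Int) := by
      simp; ring
    simp only [List.cons_append, fspBuild, ih, harith]

-- pass 1 never overwrites an existing key
lemma fspBuild_preserve (l : List (Int × Int)) :
    ∀ (i : Int) (m : PySem.Dict (Int × Int) Int) (c : Int × Int) (v : Int),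
      m.get? c = some v → (fspBuild l i m).get? c = some v := by
  induction l with
  | nil => intro i m c v h; simpa [fspBuild] using h
  | cons x l ih =>
    intro i m c v h
    simp only [fspBuild]
    by_cases hc : m.contains x = true
    · rw [if_pos hc]; exact ih _ _ _ _ h
    · rw [if_neg hc]
      apply ih
      by_cases hx : c = x
      · subst hx
        rw [PySem.Dict.contains_eq_isSome_get?, h] at hc
        simp at hc
      · rw [PySem.Dict.get?_insert_of_ne _ _ hx]; exact h

-- values produced by pass 1 are indices of the scanned segment
lemma fspBuild_range (l : List (Int × Int)) :
    ∀ (i : Int) (m : PySem.Dict (Int × Int) Int) (c : Int × Int) (v : Int),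
      (fspBuild l i m).get? c = some v →
      m.get? c = some v ∨ (i ≤ v ∧ v < i + l.length) := by
  induction l with
  | nil => intro i m c v h; left; simpa [fspBuild] using h
  | cons x l ih =>
    intro i m c v h
    simp only [fspBuild] at h
    by_cases hc : m.contains x = true
    · rw [if_pos hc] at h
      rcases ih _ _ _ _ h with h' | h'
      · exact Or.inl h'
      · right; simp only [List.length_cons] at h' ⊢; push_cast at h' ⊢; omega
    · rw [if_neg hc] at h
      rcases ih _ _ _ _ h with h' | h'
      · by_cases hx : c = x
        · subst hx
          rw [PySem.Dict.get?_insert_self] at h'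
          obtain rfl : i = v := Option.some.inj h'
          right; simp only [List.length_cons]; push_cast; omega
        · left; rwa [PySem.Dict.get?_insert_of_ne _ _ hx] at h'
      · right; simp only [List.length_cons] at h' ⊢; push_cast at h' ⊢; omega

-- the core simulation: A's loop over a suffix, with A's map = pass 1 over the prefix,
-- equals B's scan over the same suffix against the full table
lemma fsp_main (full : List (Int × Int)) :
    ∀ (rest pre : List (Int × Int)), pre ++ rest = full →
      fspAloop (full.length : Int) rest (pre.length : Int) (fspBuild pre 0 PySem.Dict.empty) =
      fspScan (full.length : Int) (fspBuild full 0 PySem.Dict.empty) rest (pre.length : Int) := by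
  intro rest
  induction rest with
  | nil => intro pre h; simp [fspAloop, fspScan]
  | cons c rest ih =>
    intro pre h
    set M := fspBuild pre 0 PySem.Dict.empty with hMdef
    set j : Int := (pre.length : Int) with hjdef
    have hF : fspBuild full 0 PySem.Dict.empty
        = fspBuild rest (j + 1) (if M.contains c then M else M.insert c j) := by
      rw [← h, fspBuild_append pre (c :: rest) 0 PySem.Dict.empty]
      simp only [fspBuild, hMdef, hjdef, zero_add]
    have hlen : (full.length : Int) = j + 1 + (rest.length : Int) := by
      rw [← h]; simp [hjdef]; ring
    -- the state A passes to its next iteration is pass 1 over the extended prefix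
    have hext : fspBuild (pre ++ [c]) 0 PySem.Dict.empty
        = (if M.contains c then M else M.insert c j) := by
      rw [fspBuild_append pre [c] 0 PySem.Dict.empty]
      simp only [fspBuild, hMdef, hjdef, zero_add]
    have hextlen : (((pre ++ [c]).length : Nat) : Int) = j + 1 := by simp [hjdef]
    have hih := ih (pre ++ [c]) (by simpa using h)
    rw [hext, hextlen] at hih
    cases hMc : M.get? c with
    | some v =>
      have hcont : M.contains c = true := by
        rw [PySem.Dict.contains_eq_isSome_get?, hMc]; rfl
      have hFc : (fspBuild full 0 PySem.Dict.empty).get? c = some v := by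
        rw [hF, hcont, if_pos rfl]
        exact fspBuild_preserve rest (j + 1) M c v hMc
      have hgetD : (fspBuild full 0 PySem.Dict.empty).getD c 0 = v :=
        PySem.Dict.getD_of_get?_eq_some _ 0 hFc
      have hvrange : 0 ≤ v ∧ v < j := by
        rcases fspBuild_range pre 0 PySem.Dict.empty c v hMc with h' | h'
        · rw [PySem.Dict.get?_empty] at h'; cases h'
        · simpa [hjdef] using h'
      rw [hcont, if_pos rfl] at hih
      simp only [fspAloop, fspScan, hMc, hgetD]
      by_cases hr : rest = []
      · subst hr
        have : ¬ (j ≠ 0 ∧ j ≠ (full.length : Int) - 1) := by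
          simp at hlen ⊢; omega
        rw [if_neg this]
        have : ¬ (0 < j ∧ j < (full.length : Int) - 1 ∧ v < j) := by
          simp at hlen ⊢; omega
        rw [if_neg this]
        exact hih
      · have hrl : 0 < (rest.length : Int) := by
          have : rest.length ≠ 0 := by simpa using hr
          omega
        have h1 : (j ≠ 0 ∧ j ≠ (full.length : Int) - 1) := by
          constructor <;> omega
        have h2 : (0 < j ∧ j < (full.length : Int) - 1 ∧ v < j) := by
          refine ⟨by omega, by omega, hvrange.2⟩
        rw [if_pos h1, if_pos h2]
    | none =>
      have hcont : M.contains c = false := by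
        rw [PySem.Dict.contains_eq_isSome_get?, hMc]; rfl
      have hFc : (fspBuild full 0 PySem.Dict.empty).get? c = some j := by
        rw [hF, hcont]
        simp only [Bool.false_eq_true, if_false]
        exact fspBuild_preserve rest (j + 1) (M.insert c j) c j (PySem.Dict.get?_insert_self _ _ _)
      have hgetD : (fspBuild full 0 PySem.Dict.empty).getD c 0 = j :=
        PySem.Dict.getD_of_get?_eq_some _ 0 hFc
      rw [hcont] at hih
      simp only [Bool.false_eq_true, if_false] at hih
      simp only [fspAloop, fspScan, hMc, hgetD]
      have : ¬ (0 < j ∧ j < (full.length : Int) - 1 ∧ j < j) := by omega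
      rw [if_neg this]
      exact hih

-- ===== VERDICT (by name: the statement is the Claim_ definition above) =====
theorem first_selfintersect_point_spec : Claim_equal_first_selfintersect_point := by
  intro l _
  show first_selfintersect_point l = first_selfintersect_point_alt l
  have := fsp_main l l [] rfl
  simpa [first_selfintersect_point, first_selfintersect_point_alt, fspBuild] using this
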